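-- pv_equiv track=rewrite | github.com/cry999/AtCoder | beginner-contest/107/D.py | convert
-- ===== SOURCE A (Python) =====
-- def convert(A: list)->list:
--     B = sorted(A)
--     C = []
--     N = len(A)
--     for a in A:
--         l, r = 0, N
--         while 1 < r - l:
--             m = (l+r)//2
--             if a < B[m]:
--                 r = m
--             else:
--                 l = m
--         C.append(r)
--     return C
-- ===== SOURCE B (Python) =====
-- def convert(A: list) -> list:
--     # Sort once, build a table mapping each value to the number of elements <= it
--     # (last sorted index + 1), then answer every query with an O(1) lookup.
--     B = sorted(A)
--     table = {}
--     for i, b in enumerate(B):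
--         table[b] = i + 1
--     return [table[a] for a in A]
-- ===== Notes on version B (the rewrite author's own statement) =====
-- stated objective: faster
-- what changed: Replaces the per-element hand-rolled binary search over the sorted list with a single sweep that records, in a dict, each value's last sorted position + 1, so every answer becomes one table lookup.
import Mathlib
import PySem

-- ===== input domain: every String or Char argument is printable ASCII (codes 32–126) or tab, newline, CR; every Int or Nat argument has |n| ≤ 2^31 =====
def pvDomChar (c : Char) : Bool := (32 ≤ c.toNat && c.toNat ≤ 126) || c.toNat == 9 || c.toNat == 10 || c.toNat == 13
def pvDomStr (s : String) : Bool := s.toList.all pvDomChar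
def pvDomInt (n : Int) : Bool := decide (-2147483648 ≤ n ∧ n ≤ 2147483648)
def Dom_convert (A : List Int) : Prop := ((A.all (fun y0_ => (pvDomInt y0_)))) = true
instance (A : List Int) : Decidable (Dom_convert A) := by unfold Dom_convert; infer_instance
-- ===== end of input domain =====

-- B replaces A's per-element hand-rolled binary search with one sweep over the sorted
-- list that tables each value's last index + 1, answered by O(1) dict lookups (constant-factor speedup).


-- ===== PORT A =====
-- midpoint bounds of A's while loop; cited by the port's decreasing_by
theorem convertWhile_mid (l r : Int) (h : 1 < r - l) :
    l + 1 ≤ PySem.Int.floordiv (l + r) 2 ∧ PySem.Int.floordiv (l + r) 2 + 1 ≤ r := by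
  constructor
  · rw [PySem.Int.le_floordiv_iff_mul_le (by omega : (0:Int) < 2)]; omega
  · have := (PySem.Int.floordiv_lt_iff_lt_mul (a := l + r) (q := r)
      (by omega : (0:Int) < 2)).mpr (by omega)
    omega

-- the 'while 1 < r - l' loop of A, over the state (l, r)
def convertWhile (B : List Int) (a l r : Int) : Int × Int :=
  if h : 1 < r - l then
    let m := PySem.Int.floordiv (l + r) 2
    if a < PySem.List.pyGetD B m 0 then convertWhile B a l m
    else convertWhile B a m r
  else (l, r)
termination_by (r - l).toNat
decreasing_by
  · have := convertWhile_mid l r h; omega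
  · have := convertWhile_mid l r h; omega

def convert (A : List Int) : List Int :=
  let B := PySem.List.sorted A (fun x => x) false
  let N : Int := A.length
  A.foldl (fun C a => C ++ [(convertWhile B a 0 N).2]) []

-- ===== PORT B =====
def convert_alt (A : List Int) : List Int :=
  let B := PySem.List.sorted A (fun x => x) false
  let table := (PySem.List.enumerate B 0).foldl
    (fun d p => d.insert p.2 (p.1 + 1)) PySem.Dict.empty
  -- table[a]: the key a is always present (a ∈ B), so the lookup is total
  A.map (fun a => table.getD a 0)

-- ===== PRECONDITION & SPEC =====
def Spec_convert (A : List Int) (out : List Int) : Prop := out = convert_alt A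
instance (A : List Int) (out : List Int) : Decidable (Spec_convert A out) := by unfold Spec_convert; infer_instance

-- ===== CLAIM (what is proved, stated in full; the proofs are below) =====
def Claim_equal_convert : Prop := ∀ (A : List Int), Dom_convert A → Spec_convert A (convert A)

-- ===== LEMMAS AND PROOFS =====

-- sorted order facts: countP (· ≤ a) brackets any probed index
theorem countP_le_of_lt_getElem (B : List Int) (a : Int) (m : Nat)
    (hs : B.Pairwise (· ≤ ·)) (hm : m < B.length) (h : a < B[m]) :
    B.countP (fun x => decide (x ≤ a)) ≤ m := by
  have hsplit := List.take_append_drop m B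
  calc B.countP (fun x => decide (x ≤ a))
      = (B.take m).countP (fun x => decide (x ≤ a)) + (B.drop m).countP (fun x => decide (x ≤ a)) := by
        conv_lhs => rw [← hsplit]
        exact List.countP_append
    _ ≤ m := by
        have hz : (B.drop m).countP (fun x => decide (x ≤ a)) = 0 := by
          rw [List.countP_eq_zero]
          intro y hy
          obtain ⟨j, hj, rfl⟩ := List.mem_iff_getElem.mp hy
          have hj' : m + j < B.length := by
            simp only [List.length_drop] at hj; omega
          have he : (List.drop m B)[j] = B[m + j]'hj' := by
            simp [List.getElem_drop]
          rw [he]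
          have hmm : B[m] ≤ B[m + j]'hj' := by
            rcases Nat.eq_zero_or_pos j with hj0 | hj0
            · subst hj0; simp
            · exact (List.pairwise_iff_getElem.mp hs) m (m + j) hm hj' (by omega)
          simp; omega
        have := List.length_take_le m B
        have := (B.take m).countP_le_length (p := fun x => decide (x ≤ a))
        omega

theorem lt_countP_of_getElem_le (B : List Int) (a : Int) (m : Nat)
    (hs : B.Pairwise (· ≤ ·)) (hm : m < B.length) (h : B[m] ≤ a) :
    m < B.countP (fun x => decide (x ≤ a)) := by
  have hsplit := List.take_append_drop (m + 1) B
  have hfull : (B.take (m + 1)).countP (fun x => decide (x ≤ a)) = (B.take (m + 1)).length := by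
    rw [List.countP_eq_length]
    intro y hy
    obtain ⟨j, hj, rfl⟩ := List.mem_iff_getElem.mp hy
    rw [List.getElem_take]
    have hjm : j ≤ m := by
      have := hj; simp [List.length_take] at this; omega
    have : B[j] ≤ B[m] := by
      rcases Nat.lt_or_ge j m with hj0 | hj0
      · exact (List.pairwise_iff_getElem.mp hs) j m (by omega) hm hj0
      · have : j = m := by omega
        simp [this]
    simp; omega
  have hlen : (B.take (m + 1)).length = m + 1 := by
    simp [List.length_take]; omega
  have hdec : B.countP (fun x => decide (x ≤ a))
      = (B.take (m + 1)).countP (fun x => decide (x ≤ a))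
        + (B.drop (m + 1)).countP (fun x => decide (x ≤ a)) := by
    conv_lhs => rw [← hsplit]
    exact List.countP_append
  omega

-- A's while loop computes countP (· ≤ a) B under the bracketing invariant
theorem convertWhile_eq (B : List Int) (a : Int) (hs : B.Pairwise (· ≤ ·)) :
    ∀ (n : Nat) (l r : Int), (r - l).toNat ≤ n →
    0 ≤ l → r ≤ (B.length : Int) →
    l < (B.countP (fun x => decide (x ≤ a)) : Int) →
    (B.countP (fun x => decide (x ≤ a)) : Int) ≤ r →
    (convertWhile B a l r).2 = (B.countP (fun x => decide (x ≤ a)) : Int) := by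
  intro n
  induction n with
  | zero => intro l r hn h0 hN hl hr; omega
  | succ n ih =>
    intro l r hn h0 hN hl hr
    rw [convertWhile]
    by_cases h : 1 < r - l
    · have hmid := convertWhile_mid l r h
      set m := PySem.Int.floordiv (l + r) 2 with hm
      have hm0 : 0 ≤ m := by omega
      have hmN : m < (B.length : Int) := by omega
      have hget : PySem.List.pyGetD B m 0 = B[m.toNat] :=
        PySem.List.pyGetD_eq_getElem B 0 hm0 hmN
      simp only [h, dif_pos]
      by_cases hbr : a < PySem.List.pyGetD B m 0
      · rw [if_pos hbr]
        have hcm : B.countP (fun x => decide (x ≤ a)) ≤ m.toNat :=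
          countP_le_of_lt_getElem B a m.toNat hs (by omega) (by rw [← hget]; exact hbr)
        exact ih l m (by omega) h0 (by omega) hl (by omega)
      · rw [if_neg hbr]
        have hcm : m.toNat < B.countP (fun x => decide (x ≤ a)) :=
          lt_countP_of_getElem_le B a m.toNat hs (by omega) (by rw [← hget]; omega)
        exact ih m r (by omega) (by omega) hN (by omega) hr
    · simp only [h, dif_neg, not_false_iff]
      omega

theorem enumerate_append_singleton (xs : List Int) (x : Int) : ∀ (s : Int),
    PySem.List.enumerate (xs ++ [x]) s = PySem.List.enumerate xs s ++ [(s + xs.length, x)] := by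
  induction xs with
  | nil => intro s; simp [PySem.List.enumerate_nil, PySem.List.enumerate_cons]
  | cons y ys ih =>
    intro s
    simp only [List.cons_append, PySem.List.enumerate_cons, ih (s + 1), List.length_cons]
    have hcast : s + 1 + (ys.length : Int) = s + ((ys.length + 1 : Nat) : Int) := by
      push_cast; ring
    rw [hcast]

-- B's table lookup equals countP (· ≤ a) on a sorted list containing a
theorem table_getD_eq (B : List Int) (a : Int) (hs : B.Pairwise (· ≤ ·)) (ha : a ∈ B) :
    ((PySem.List.enumerate B 0).foldl (fun d p => d.insert p.2 (p.1 + 1))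
        PySem.Dict.empty).getD a 0 = (B.countP (fun x => decide (x ≤ a)) : Int) := by
  induction B using List.reverseRecOn with
  | nil => simp at ha
  | append_singleton ys x ih =>
    have hys : ys.Pairwise (· ≤ ·) := (List.pairwise_append.mp hs).1
    have hub : ∀ y ∈ ys, y ≤ x := by
      intro y hy
      exact (List.pairwise_append.mp hs).2.2 y hy x (by simp)
    rw [enumerate_append_singleton, List.foldl_append]
    simp only [List.foldl_cons, List.foldl_nil]
    rw [PySem.Dict.getD_insert]
    by_cases hax : a = x
    · rw [if_pos hax]
      have : (ys ++ [x]).countP (fun t => decide (t ≤ a)) = ys.length + 1 := by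
        rw [List.countP_eq_length.mpr]
        · simp
        · intro y hy
          simp only [List.mem_append, List.mem_singleton] at hy
          rcases hy with hy | rfl
          · simp [hax]; exact hub y hy
          · simp [hax]
      rw [this]; push_cast; ring
    · rw [if_neg hax]
      have hays : a ∈ ys := by
        rcases List.mem_append.mp ha with h | h
        · exact h
        · simp at h; exact absurd h hax
      rw [ih hys hays]
      have hax' : ¬ (x ≤ a) := by
        have := hub a hays
        rcases lt_or_eq_of_le this with h | h
        · omega
        · exact absurd h hax
      congr 1
      rw [List.countP_append]
      simp [hax']

-- ===== VERDICT (by name: the statement is the Claim_ definition above) =====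
theorem convert_spec : Claim_equal_convert := by
  intro A _
  unfold Spec_convert convert convert_alt
  simp only
  set B := PySem.List.sorted A (fun x => x) false with hB
  have hs : B.Pairwise (· ≤ ·) := PySem.List.sorted_pairwise A (fun x => x)
  have hperm : B.Perm A := PySem.List.sorted_perm A (fun x => x) false
  have hlen : B.length = A.length := hperm.length_eq
  rw [PySem.List.foldl_append_singleton_eq_map]
  simp only [List.nil_append]
  apply List.map_congr_left
  intro a haA
  have haB : a ∈ B := hperm.mem_iff.mpr haA
  have hc1 : 0 < B.countP (fun x => decide (x ≤ a)) := by
    rw [List.countP_pos_iff]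
    exact ⟨a, haB, by simp⟩
  have hcN : B.countP (fun x => decide (x ≤ a)) ≤ B.length := List.countP_le_length
  rw [convertWhile_eq B a hs (((A.length : Int)) - 0).toNat 0 (A.length) (by omega)
      (by omega) (by omega) (by exact_mod_cast hc1) (by rw [← hlen]; exact_mod_cast hcN)]
  rw [table_getD_eq B a hs haB]
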